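-- pv_equiv track=rewrite | github.com/rjsnh1522/geeks-4-geeks-python | hashing/hashing_2/replicating_sbstring.py | solve
-- ===== SOURCE A (Python) =====
-- def solve(B, A):
--     string = A
--     counter = B
--     dicter = dict()
--     for i in string:
--         if i in dicter:
--             dicter[i] += 1
--         else:
--             dicter[i] = 1
--
--     for i in dicter:
--         if dicter[i] % counter != 0:
--             return -1
--     return 1
-- ===== SOURCE B (Python) =====
-- def solve(B, A):
--     # Sort the characters and check each consecutive run's length for divisibility by B.
--     s = sorted(A)
--     while s:
--         c = s[0]
--         k = 1
--         while k < len(s) and s[k] == c: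
--             k += 1
--         if k % B != 0:
--             return -1
--         s = s[k:]
--     return 1
-- ===== Notes on version B (the rewrite author's own statement) =====
-- stated objective: alternative
-- what changed: B sorts the characters and checks the length of each consecutive run instead of building a frequency dictionary and scanning its keys.
import Mathlib
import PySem

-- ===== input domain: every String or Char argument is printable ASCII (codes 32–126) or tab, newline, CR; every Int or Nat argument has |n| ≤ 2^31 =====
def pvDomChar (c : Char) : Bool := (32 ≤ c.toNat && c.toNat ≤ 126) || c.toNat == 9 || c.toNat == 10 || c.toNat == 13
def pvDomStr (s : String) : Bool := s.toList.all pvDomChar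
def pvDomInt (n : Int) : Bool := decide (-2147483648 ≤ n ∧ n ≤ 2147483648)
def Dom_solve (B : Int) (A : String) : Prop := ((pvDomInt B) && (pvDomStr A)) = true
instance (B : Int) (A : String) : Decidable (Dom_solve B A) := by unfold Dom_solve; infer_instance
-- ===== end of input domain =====

-- B sorts the characters and checks each consecutive run's length instead of building a frequency dict and scanning its keys (alternative decomposition, same result; return value only).


-- ===== PORT A =====
-- second loop of A: for i in dicter: if dicter[i] % counter != 0: return -1 / return 1
-- (every iterated key is present in the dict, so dicter[i] is exactly getD _ 0)
def solveCheckKeys (counter : Int) (d : PySem.Dict Char Int) : List Char → Int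
  | [] => 1
  | k :: ks =>
    if PySem.Int.mod (d.getD k 0) counter ≠ 0 then -1 else solveCheckKeys counter d ks

def solve (B : Int) (A : String) : Int :=
  let string := A.toList
  let counter := B
  let dicter : PySem.Dict Char Int :=
    string.foldl (fun d i =>
      if d.contains i then d.modify i 0 (· + 1) else d.insert i 1) PySem.Dict.empty
  solveCheckKeys counter dicter dicter.keys

-- ===== PORT B =====
-- outer while over the sorted character list; the inner while advanced k past the run of the
-- head character, so the run is 'head + takeWhile (== head)' and s = s[k:] is the dropWhile
def solveAltLoop (B : Int) : List Char → Int
  | [] => 1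
  | c :: rest =>
    let run := rest.takeWhile (· == c)
    if PySem.Int.mod (1 + (run.length : Int)) B ≠ 0 then -1
    else solveAltLoop B (rest.dropWhile (· == c))
termination_by l => l.length
decreasing_by
  simp only [List.length_cons]
  exact Nat.lt_succ_of_le (List.length_dropWhile_le _ _)

def solve_alt (B : Int) (A : String) : Int :=
  solveAltLoop B (PySem.List.sorted A.toList (fun x => x) false)

-- ===== PRECONDITION & SPEC =====
-- Pre_ excludes only B = 0 with nonempty A: there both Pythons raise ZeroDivisionError.
def Pre_solve (B : Int) (A : String) : Prop := B ≠ 0 ∨ A.toList = []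
instance (B : Int) (A : String) : Decidable (Pre_solve B A) := by unfold Pre_solve; infer_instance
def pvWitness_solve : Int × String := (2, "abab")

def Spec_solve (B : Int) (A : String) (out : Int) : Prop := out = solve_alt B A
instance (B : Int) (A : String) (out : Int) : Decidable (Spec_solve B A out) := by unfold Spec_solve; infer_instance

-- ===== CLAIM (what is proved, stated in full; the proofs are below) =====
def Claim_equal_solve : Prop := ∀ (B : Int) (A : String), Dom_solve B A → Pre_solve B A → Spec_solve B A (solve B A)

-- ===== LEMMAS AND PROOFS =====

-- A's branchy counting fold is the Counter fold (insert of 1 at a fresh key = modify from default 0)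
theorem foldl_branchy_eq_counter (l : List Char) (d : PySem.Dict Char Int) :
    l.foldl (fun d i => if d.contains i then d.modify i 0 (· + 1) else d.insert i 1) d
      = l.foldl (fun d i => d.modify i 0 (· + 1)) d := by
  induction l generalizing d with
  | nil => rfl
  | cons x xs ih =>
    simp only [List.foldl_cons]
    by_cases h : d.contains x = true
    · rw [if_pos h, ih]
    · rw [if_neg h, ih]
      congr 1
      have hg : d.getD x 0 = 0 :=
        PySem.Dict.getD_of_not_contains d 0 (Bool.not_eq_true _ ▸ h)
      simp [PySem.Dict.modify, PySem.Dict.insert, Bool.not_eq_true _ ▸ h, hg]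

-- the key-check loop decides "every key's stored count is divisible by B"
theorem solveCheckKeys_eq (B : Int) (d : PySem.Dict Char Int) (ks : List Char) :
    solveCheckKeys B d ks
      = if ∀ k ∈ ks, PySem.Int.mod (d.getD k 0) B = 0 then 1 else -1 := by
  induction ks with
  | nil => simp [solveCheckKeys]
  | cons k ks ih =>
    simp only [solveCheckKeys, ih]
    by_cases h : PySem.Int.mod (d.getD k 0) B = 0
    · simp [h]
    · simp [h]

-- B's loop on a sorted list decides the same divisibility predicate over the char counts
theorem solveAltLoop_eq_aux (B : Int) (n : Nat) :
    ∀ (l : List Char), l.length ≤ n → l.Pairwise (· ≤ ·) →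
    solveAltLoop B l = if ∀ c ∈ l, PySem.Int.mod ((l.count c : Int)) B = 0 then 1 else -1 := by
  induction n with
  | zero =>
    intro l hl _
    have : l = [] := List.eq_nil_of_length_eq_zero (Nat.le_zero.mp hl)
    subst this; simp [solveAltLoop]
  | succ n ih =>
    intro l hl hp
    match l with
    | [] => simp [solveAltLoop]
    | c :: rest =>
      have hrest : rest.Pairwise (· ≤ ·) := hp.of_cons
      have hcle : ∀ y ∈ rest, c ≤ y := fun y hy => List.rel_of_pairwise_cons hp hy
      set tw := rest.takeWhile (· == c) with htw
      set dw := rest.dropWhile (· == c) with hdw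
      have hsplit : tw ++ dw = rest := List.takeWhile_append_dropWhile
      have htwc : ∀ x ∈ tw, x = c := by
        intro x hx
        have := List.mem_takeWhile_imp hx
        simpa using this
      have hdwp : dw.Pairwise (· ≤ ·) := by
        have : dw.Sublist rest := List.dropWhile_sublist _
        exact hrest.sublist this
      have hcdw : c ∉ dw := by
        intro hc
        cases hdwe : dw with
        | nil => rw [hdwe] at hc; simp at hc
        | cons d dw' =>
          have hdne : ¬ (d == c) = true := by
            have h0 := List.head?_dropWhile_not (· == c) rest
            rw [← hdw, hdwe] at h0; simpa using h0
          have hdc : d ≠ c := by simpa using hdne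
          have hcd : c ≤ d := by
            apply hcle
            rw [← hsplit, hdwe]; simp
          rw [hdwe] at hc hdwp
          rcases List.mem_cons.mp hc with h | h
          · exact hdc h.symm
          · have hdle : d ≤ c := List.rel_of_pairwise_cons hdwp h
            exact hdc (le_antisymm hdle hcd)
      have hcount_c : (((c :: rest).count c : Nat) : Int) = 1 + (tw.length : Int) := by
        rw [← hsplit]
        have h1 : tw.count c = tw.length := by
          rw [List.count_eq_length]
          intro x hx
          have := htwc x hx; simp [this]
        have h2 : dw.count c = 0 := List.count_eq_zero.mpr hcdw
        simp [List.count_append, h1, h2]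
        omega
      have hcount_ne : ∀ x, x ≠ c → (c :: rest).count x = dw.count x := by
        intro x hxc
        rw [← hsplit]
        have h1 : tw.count x = 0 := by
          rw [List.count_eq_zero]; intro hx; exact hxc (htwc x hx)
        have h2 : ¬ (c = x) := fun h => hxc h.symm
        simp [List.count_append, h1, h2]
      have hmem : ∀ x, x ∈ (c :: rest) ↔ (x = c ∨ x ∈ dw) := by
        intro x
        constructor
        · intro hx
          rcases List.mem_cons.mp hx with h | h
          · exact Or.inl h
          · rw [← hsplit] at h
            rcases List.mem_append.mp h with h | h
            · exact Or.inl (htwc x h)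
            · exact Or.inr h
        · rintro (rfl | h)
          · exact List.mem_cons_self
          · apply List.mem_cons_of_mem
            rw [← hsplit]; exact List.mem_append_right _ h
      have hdwcount : ∀ x ∈ dw, ((dw.count x : Nat) : Int) = (((c :: rest).count x : Nat) : Int) := by
        intro x hx
        have hxc : x ≠ c := fun h => hcdw (h ▸ hx)
        rw [hcount_ne x hxc]
      have hdwlen : dw.length ≤ n := by
        have hle := List.length_dropWhile_le (· == c) rest
        rw [← hdw] at hle
        simp only [List.length_cons] at hl
        omega
      rw [solveAltLoop]
      by_cases hc : PySem.Int.mod (1 + (tw.length : Int)) B = 0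
      · rw [if_neg (by simpa using hc), ih dw hdwlen hdwp]
        have hiff : (∀ x ∈ dw, PySem.Int.mod ((dw.count x : Nat) : Int) B = 0)
            ↔ (∀ x ∈ (c :: rest), PySem.Int.mod (((c :: rest).count x : Nat) : Int) B = 0) := by
          constructor
          · intro h x hx
            rcases (hmem x).mp hx with rfl | hxd
            · rw [hcount_c]; exact hc
            · rw [← hdwcount x hxd]; exact h x hxd
          · intro h x hx
            rw [hdwcount x hx]
            exact h x ((hmem x).mpr (Or.inr hx))
        rw [if_congr hiff rfl rfl]
      · rw [if_pos (by simpa using hc)]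
        rw [if_neg]
        intro h
        exact hc (hcount_c ▸ h c List.mem_cons_self)

-- ===== VERDICT (by name: the statement is the Claim_ definition above) =====
theorem solve_spec : Claim_equal_solve := by
  intro B A _ _
  unfold Spec_solve solve solve_alt
  dsimp only
  rw [foldl_branchy_eq_counter]
  rw [show (A.toList.foldl (fun d i => d.modify i 0 (· + 1)) PySem.Dict.empty)
        = PySem.Dict.counter A.toList from (PySem.Dict.counter_eq_foldl A.toList).symm]
  rw [solveCheckKeys_eq, PySem.Dict.keys_counter]
  have hsorted := PySem.List.sorted_pairwise A.toList (fun x => x) (κ := Char)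
  rw [solveAltLoop_eq_aux B (PySem.List.sorted A.toList (fun x => x) false).length _ le_rfl hsorted]
  have hperm : (PySem.List.sorted A.toList (fun x => x) false).Perm A.toList :=
    PySem.List.sorted_perm _ _ _
  apply if_congr _ rfl rfl
  constructor
  · intro h c hc
    have hc' : c ∈ (PySem.Set.ofList A.toList : List Char) :=
      (PySem.Set.mem_ofList _ _).mpr ((PySem.List.mem_sorted _ _ _ _).mp hc)
    have hv := h c hc'
    rw [PySem.Dict.getD_counter] at hv
    rwa [hperm.count_eq]
  · intro h c hc
    have hc' : c ∈ PySem.List.sorted A.toList (fun x => x) false :=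
      (PySem.List.mem_sorted _ _ _ _).mpr ((PySem.Set.mem_ofList _ _).mp hc)
    have hv := h c hc'
    rw [hperm.count_eq] at hv
    rwa [PySem.Dict.getD_counter]
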